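-- pv_equiv track=rewrite | github.com/GaganPaul/sentinent_anti_virus | detectors.py | _get_threat_level
-- ===== SOURCE A (Python) =====
-- def _get_threat_level(rule_name):
--     """Determine threat level based on rule name"""
--     rule_lower = rule_name.lower()
--
--     # High threat keywords
--     if any(keyword in rule_lower for keyword in ['apt', 'ransomware', 'rat', 'backdoor', 'trojan', 'rootkit']):
--         return 3
--     # Medium threat keywords
--     elif any(keyword in rule_lower for keyword in ['malware', 'virus', 'worm', 'exploit', 'cve']):
--         return 2
--     # Low threat keywords
--     elif any(keyword in rule_lower for keyword in ['suspicious', 'packed', 'obfuscated']):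
--         return 1
--     else:
--         return 2  # Default to medium threat
-- ===== SOURCE B (Python) =====
-- _KEYWORD_LEVELS = {
--     'apt': 3, 'ransomware': 3, 'rat': 3, 'backdoor': 3, 'trojan': 3, 'rootkit': 3,
--     'malware': 2, 'virus': 2, 'worm': 2, 'exploit': 2, 'cve': 2,
--     'suspicious': 1, 'packed': 1, 'obfuscated': 1,
-- }
--
-- def _get_threat_level(rule_name):
--     lowered = rule_name.lower()
--     return max((level for keyword, level in _KEYWORD_LEVELS.items() if keyword in lowered),
--                default=2)
-- ===== Notes on version B (the rewrite author's own statement) =====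
-- stated objective: alternative
-- what changed: Replaced A's ordered short-circuiting tier cascade (three any()-checks, highest tier first) with an unordered max-aggregation: B collects the levels of ALL keywords contained in the lowered name and returns their maximum with default 2; correct because A's cascade tests tiers in descending level order.
import Mathlib
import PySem

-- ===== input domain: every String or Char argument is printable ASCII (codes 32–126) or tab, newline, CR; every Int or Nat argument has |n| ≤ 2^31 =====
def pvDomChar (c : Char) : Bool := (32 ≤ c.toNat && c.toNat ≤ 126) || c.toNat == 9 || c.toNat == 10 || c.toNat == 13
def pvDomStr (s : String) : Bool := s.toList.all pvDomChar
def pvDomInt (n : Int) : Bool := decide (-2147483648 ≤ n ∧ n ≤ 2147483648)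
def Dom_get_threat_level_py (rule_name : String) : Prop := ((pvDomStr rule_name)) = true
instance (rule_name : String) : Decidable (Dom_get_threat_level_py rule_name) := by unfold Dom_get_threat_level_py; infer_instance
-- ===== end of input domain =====

-- B replaces A's ordered tier-by-tier short-circuit cascade with a max-aggregation over the levels of all matching keywords (default 2); same behaviour, alternative algorithm.


-- ===== PORT A =====
def get_threat_level_py (rule_name : String) : Int :=
  let rule_lower := PySem.Str.lower rule_name
  if (["apt", "ransomware", "rat", "backdoor", "trojan", "rootkit"].any
        (fun keyword => PySem.Str.isIn keyword rule_lower)) then 3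
  else if (["malware", "virus", "worm", "exploit", "cve"].any
        (fun keyword => PySem.Str.isIn keyword rule_lower)) then 2
  else if (["suspicious", "packed", "obfuscated"].any
        (fun keyword => PySem.Str.isIn keyword rule_lower)) then 1
  else 2

-- ===== PORT B =====
-- the dict _KEYWORD_LEVELS, as an association list in insertion order
def pvKeywordLevels : List (String × Int) :=
  [("apt", 3), ("ransomware", 3), ("rat", 3), ("backdoor", 3), ("trojan", 3), ("rootkit", 3),
   ("malware", 2), ("virus", 2), ("worm", 2), ("exploit", 2), ("cve", 2),
   ("suspicious", 1), ("packed", 1), ("obfuscated", 1)]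

-- max((level for keyword, level in _KEYWORD_LEVELS.items() if keyword in lowered), default=2)
def get_threat_level_py_alt (rule_name : String) : Int :=
  let lowered := PySem.Str.lower rule_name
  PySem.List.maxD
    ((pvKeywordLevels.filter (fun p => PySem.Str.isIn p.1 lowered)).map Prod.snd)
    (fun x => x) 2

-- ===== PRECONDITION & SPEC =====
def Spec_get_threat_level_py (rule_name : String) (out : Int) : Prop := out = get_threat_level_py_alt rule_name
instance (rule_name : String) (out : Int) : Decidable (Spec_get_threat_level_py rule_name out) := by unfold Spec_get_threat_level_py; infer_instance

-- ===== CLAIM (what is proved, stated in full; the proofs are below) =====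
def Claim_equal_get_threat_level_py : Prop := ∀ (rule_name : String), Dom_get_threat_level_py rule_name → Spec_get_threat_level_py rule_name (get_threat_level_py rule_name)

-- ===== LEMMAS AND PROOFS =====

/-- Filtering a block of table entries that all carry the same level and projecting
    the level is a filter over the keywords mapped to that constant, then the rest. -/
theorem pvFilterMapBlock (s : String) (kws : List String) (lvl : Int)
    (rest : List (String × Int)) :
    (((kws.map (fun k => (k, lvl))) ++ rest).filter
        (fun p => PySem.Str.isIn p.1 s)).map Prod.snd
      = (kws.filter (fun k => PySem.Str.isIn k s)).map (fun _ => lvl)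
        ++ ((rest.filter (fun p => PySem.Str.isIn p.1 s)).map Prod.snd) := by
  induction kws with
  | nil => simp
  | cons k ks ih =>
      simp only [List.map_cons, List.cons_append, List.filter_cons]
      by_cases h : PySem.Str.isIn k s = true <;> simp_all

/-- A running max started at an upper bound of the list stays there. -/
theorem pvFoldlMaxFixed (t : List Int) (a : Int) (h : ∀ y ∈ t, y ≤ a) :
    t.foldl max a = a := by
  rcases PySem.List.foldl_max_mem t a with h1 | h1
  · exact h1
  · exact le_antisymm (h _ h1) (PySem.List.le_foldl_max t a).1

/-- The max (default 2) of a list made of a block of 3s, then 2s, then 1s. -/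
theorem pvMaxDBlocks {α β γ : Type} (a : List α) (b : List β) (c : List γ) :
    PySem.List.maxD
        ((a.map (fun _ => (3 : Int))) ++ ((b.map (fun _ => (2 : Int)))
          ++ (c.map (fun _ => (1 : Int))))) (fun x => x) 2
      = if a = [] then (if b = [] then (if c = [] then 2 else 1) else 2) else 3 := by
  cases a with
  | cons x a' =>
      simp only [List.map_cons, List.cons_append, PySem.List.maxD, PySem.List.max?_id_cons,
        Option.getD_some]
      rw [pvFoldlMaxFixed]
      · simp
      · intro y hy
        simp only [List.mem_append, List.mem_map] at hy
        rcases hy with ⟨_, _, h⟩ | ⟨_, _, h⟩ | ⟨_, _, h⟩ <;> omega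
  | nil =>
    cases b with
    | cons x b' =>
        simp only [List.map_nil, List.nil_append, List.map_cons, List.cons_append,
          PySem.List.maxD, PySem.List.max?_id_cons, Option.getD_some]
        rw [pvFoldlMaxFixed]
        · simp
        · intro y hy
          simp only [List.mem_append, List.mem_map] at hy
          rcases hy with ⟨_, _, h⟩ | ⟨_, _, h⟩ <;> omega
    | nil =>
      cases c with
      | cons x c' =>
          simp only [List.map_nil, List.nil_append, List.map_cons,
            PySem.List.maxD, PySem.List.max?_id_cons, Option.getD_some]
          rw [pvFoldlMaxFixed]
          · simp
          · intro y hy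
            simp only [List.mem_map] at hy
            rcases hy with ⟨_, _, h⟩
            omega
      | nil => simp [PySem.List.maxD, PySem.List.max?]

/-- any = true exactly when the filter kept something. -/
theorem pvAnyFilter {α : Type} (l : List α) (p : α → Bool) :
    l.any p = !(l.filter p).isEmpty := by
  cases h : (l.filter p).isEmpty
  · have hne : l.filter p ≠ [] := by simpa using h
    obtain ⟨x, hx⟩ := List.exists_mem_of_ne_nil _ hne
    have hm := List.mem_filter.mp hx
    simp only [Bool.not_false, List.any_eq_true]
    exact ⟨x, hm.1, hm.2⟩
  · simp only [List.isEmpty_iff, List.filter_eq_nil_iff] at h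
    simp only [Bool.not_true, List.any_eq_false]
    intro x hx
    simpa using h x hx

-- ===== VERDICT (by name: the statement is the Claim_ definition above) =====
theorem get_threat_level_py_spec : Claim_equal_get_threat_level_py := by
  intro rule_name _
  unfold Spec_get_threat_level_py get_threat_level_py get_threat_level_py_alt
  set s := PySem.Str.lower rule_name with hs
  have htab : pvKeywordLevels =
      (["apt", "ransomware", "rat", "backdoor", "trojan", "rootkit"].map (fun k => (k, (3 : Int)))) ++
      ((["malware", "virus", "worm", "exploit", "cve"].map (fun k => (k, (2 : Int)))) ++
       ((["suspicious", "packed", "obfuscated"].map (fun k => (k, (1 : Int)))) ++ [])) := rfl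
  simp only [htab]
  rw [List.filter_append, List.filter_append, List.filter_append]
  simp only [List.filter_nil, List.append_nil]
  rw [List.map_append, List.map_append]
  have h3 := pvFilterMapBlock s ["apt", "ransomware", "rat", "backdoor", "trojan", "rootkit"] 3 []
  have h2 := pvFilterMapBlock s ["malware", "virus", "worm", "exploit", "cve"] 2 []
  have h1 := pvFilterMapBlock s ["suspicious", "packed", "obfuscated"] 1 []
  simp only [List.append_nil, List.filter_nil, List.map_nil] at h3 h2 h1
  rw [h3, h2, h1, pvMaxDBlocks]
  rw [pvAnyFilter, pvAnyFilter, pvAnyFilter]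
  rcases ha : (List.filter (fun k => PySem.Str.isIn k s)
      ["apt", "ransomware", "rat", "backdoor", "trojan", "rootkit"]).isEmpty <;>
  rcases hb : (List.filter (fun k => PySem.Str.isIn k s)
      ["malware", "virus", "worm", "exploit", "cve"]).isEmpty <;>
  rcases hc : (List.filter (fun k => PySem.Str.isIn k s)
      ["suspicious", "packed", "obfuscated"]).isEmpty <;>
  simp_all [List.isEmpty_iff]
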